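-- pv_equiv track=rewrite | github.com/Deepika081/resume-screening-system | resume_scoring.py | segment_resume
-- ===== SOURCE A (Python) =====
-- def segment_resume(resume_lines, heading_document):
--     segmented_resume = {}
--     headings = list(heading_document.items())
--
--     for i in range(len(headings)):
--         section, start = headings[i]
--         end = headings[i + 1][1] if i < len(headings) - 1 else len(resume_lines)
--
--         segment = [
--             line for idx, line in resume_lines
--             if start < idx < end
--         ]
--         segmented_resume[section] = segment
--
--     return segmented_resume
-- ===== SOURCE B (Python) =====
-- def segment_resume(resume_lines, heading_document):
--     items = list(heading_document.items())
--     bounds = [start for _, start in items[1:]] + [len(resume_lines)]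
--     intervals = list(zip(items, bounds))
--     segmented_resume = {section: [] for section, _ in items}
--     for idx, line in resume_lines:
--         for (section, start), end in intervals:
--             if start < idx < end:
--                 segmented_resume[section].append(line)
--     return segmented_resume
-- ===== Notes on version B (the rewrite author's own statement) =====
-- stated objective: alternative
-- what changed: Instead of rescanning the whole line list once per heading, B precomputes each heading's (start, end) interval once and makes a single pass over the lines, appending each line to every bucket whose interval contains its index.
import Mathlib
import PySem

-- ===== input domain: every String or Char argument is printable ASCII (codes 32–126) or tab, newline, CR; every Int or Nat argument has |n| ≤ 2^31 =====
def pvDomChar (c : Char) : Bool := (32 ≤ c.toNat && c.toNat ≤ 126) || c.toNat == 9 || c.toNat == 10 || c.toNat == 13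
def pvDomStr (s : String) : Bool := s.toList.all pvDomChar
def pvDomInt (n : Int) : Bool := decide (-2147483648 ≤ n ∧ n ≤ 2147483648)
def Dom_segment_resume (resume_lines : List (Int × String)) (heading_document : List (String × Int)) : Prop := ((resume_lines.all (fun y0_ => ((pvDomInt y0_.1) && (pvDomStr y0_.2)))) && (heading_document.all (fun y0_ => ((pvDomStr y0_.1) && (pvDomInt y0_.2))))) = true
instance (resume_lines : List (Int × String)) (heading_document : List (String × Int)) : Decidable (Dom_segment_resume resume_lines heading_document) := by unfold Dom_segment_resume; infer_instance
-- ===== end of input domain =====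

-- B replaces A's per-heading rescans of all lines by a single pass over the lines that appends
-- each line to every bucket whose precomputed (start, end) interval contains its index
-- (objective: alternative traversal, same output).

-- ===== PORT A =====
def segment_resume (resume_lines : List (Int × String)) (heading_document : List (String × Int)) : List (String × List String) :=
  let headings := heading_document
  ((List.range headings.length).foldl (fun segmented_resume i =>
    let h := headings.getD i ("", 0)
    let end_ : Int := if i < headings.length - 1 then (headings.getD (i + 1) ("", 0)).2
                      else (resume_lines.length : Int)
    let segment := (resume_lines.filter (fun p => decide (h.2 < p.1) && decide (p.1 < end_))).map (fun p => p.2)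
    segmented_resume.insert h.1 segment) PySem.Dict.empty).items

-- ===== PORT B =====
def segment_resume_alt (resume_lines : List (Int × String)) (heading_document : List (String × Int)) : List (String × List String) :=
  let items := heading_document
  let bounds : List Int := (items.drop 1).map (fun p => p.2) ++ [(resume_lines.length : Int)]
  let intervals := items.zip bounds
  let init : PySem.Dict String (List String) :=
    items.foldl (fun d p => d.insert p.1 []) PySem.Dict.empty
  (resume_lines.foldl (fun d p =>
      intervals.foldl (fun d q =>
        if decide (q.1.2 < p.1) && decide (p.1 < q.2) then d.modify q.1.1 [] (fun l => l ++ [p.2])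
        else d) d) init).items

-- ===== PRECONDITION & SPEC =====
-- Pre_ requires the heading keys to be pairwise distinct: heading_document is a Python dict,
-- whose keys are necessarily distinct, so an association list with duplicate keys encodes no
-- actual Python input of A.
def Pre_segment_resume (resume_lines : List (Int × String)) (heading_document : List (String × Int)) : Prop :=
  (heading_document.map Prod.fst).Nodup
instance (resume_lines : List (Int × String)) (heading_document : List (String × Int)) : Decidable (Pre_segment_resume resume_lines heading_document) := by unfold Pre_segment_resume; infer_instance

def pvWitness_segment_resume : (List (Int × String)) × (List (String × Int)) :=
  ([(0, "alpha"), (1, "beta"), (2, "gamma")], [("Skills", 0), ("Education", 1)])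

def Spec_segment_resume (resume_lines : List (Int × String)) (heading_document : List (String × Int)) (out : List (String × List String)) : Prop := out = segment_resume_alt resume_lines heading_document
instance (resume_lines : List (Int × String)) (heading_document : List (String × Int)) (out : List (String × List String)) : Decidable (Spec_segment_resume resume_lines heading_document out) := by unfold Spec_segment_resume; infer_instance

-- ===== CLAIM (what is proved, stated in full; the proofs are below) =====
def Claim_equal_segment_resume : Prop := ∀ (resume_lines : List (Int × String)) (heading_document : List (String × Int)), Dom_segment_resume resume_lines heading_document → Pre_segment_resume resume_lines heading_document → Spec_segment_resume resume_lines heading_document (segment_resume resume_lines heading_document)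

-- ===== LEMMAS AND PROOFS =====

-- the common intermediate description: one (section, filtered lines) bucket per heading interval
def pvBounds (resume_lines : List (Int × String)) (hd : List (String × Int)) : List Int :=
  (hd.drop 1).map (fun p => p.2) ++ [(resume_lines.length : Int)]

def pvCond (p : Int × String) (q : (String × Int) × Int) : Bool :=
  decide (q.1.2 < p.1) && decide (p.1 < q.2)

def pvFlt (L : List (Int × String)) (q : (String × Int) × Int) : List String :=
  (L.filter (fun p => pvCond p q)).map (fun p => p.2)

def pvMid (resume_lines : List (Int × String)) (hd : List (String × Int)) : List (String × List String) :=
  (hd.zip (pvBounds resume_lines hd)).map (fun q => (q.1.1, pvFlt resume_lines q))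

lemma pvBounds_length (rl : List (Int × String)) (hd : List (String × Int)) :
    hd.length ≤ (pvBounds rl hd).length := by
  simp [pvBounds]; omega

lemma pv_zip_keys (rl : List (Int × String)) (hd : List (String × Int)) :
    (hd.zip (pvBounds rl hd)).map (fun q => q.1.1) = hd.map Prod.fst := by
  have h : (hd.zip (pvBounds rl hd)).map (fun q => q.1.1)
      = ((hd.zip (pvBounds rl hd)).map Prod.fst).map Prod.fst := by
    rw [List.map_map]; rfl
  rw [h, List.map_fst_zip (pvBounds_length rl hd)]

-- generic: folding fresh-key inserts appends the pairs
lemma pv_foldl_insert_items {ν : Type} (ps : List (String × ν)) (d : PySem.Dict String ν)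
    (hnd : (d.items.map Prod.fst ++ ps.map Prod.fst).Nodup) :
    (ps.foldl (fun d p => d.insert p.1 p.2) d).items = d.items ++ ps := by
  induction ps generalizing d with
  | nil => simp
  | cons p ps ih =>
    have hk : p.1 ∉ d.items.map Prod.fst := by
      intro hmem
      exact (List.disjoint_of_nodup_append hnd) hmem (by simp)
    have hc : d.contains p.1 = false := by
      simp only [PySem.Dict.contains, List.any_eq_false, beq_iff_eq]
      intro x hx he
      exact hk (he ▸ List.mem_map_of_mem (f := Prod.fst) hx)
    have hins : d.insert p.1 p.2 = PySem.Dict.mk (d.items ++ [(p.1, p.2)]) := by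
      simp [PySem.Dict.insert, hc]
    rw [List.foldl_cons, hins,
      ih (PySem.Dict.mk (d.items ++ [(p.1, p.2)])) (by simpa using hnd)]
    simp

lemma pv_getD_of_split {ν : Type} (pre : List (String × ν)) (k : String) (v : ν) (rest : List (String × ν)) (dflt : ν)
    (hk : k ∉ pre.map Prod.fst) :
    (PySem.Dict.mk (pre ++ (k, v) :: rest)).getD k dflt = v := by
  induction pre with
  | nil => simp [PySem.Dict.getD, PySem.Dict.get?]
  | cons a pre ih =>
    have ha : (a.1 == k) = false := by
      simp only [beq_eq_false_iff_ne, ne_eq]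
      intro h; exact hk (by simp [h])
    simp only [List.map_cons, List.mem_cons] at hk
    simp only [List.cons_append]
    have hfind : List.find? (fun p => p.1 == k) (a :: (pre ++ (k, v) :: rest))
        = List.find? (fun p => p.1 == k) (pre ++ (k, v) :: rest) :=
      List.find?_cons_of_neg (by simp [ha])
    simp only [PySem.Dict.getD, PySem.Dict.get?] at ih ⊢
    rw [hfind]
    exact ih (fun h => hk (Or.inr h))

lemma pv_insert_of_split {ν : Type} (pre : List (String × ν)) (k : String) (v w : ν) (rest : List (String × ν))
    (hnd : ((pre ++ (k, v) :: rest).map Prod.fst).Nodup) :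
    (PySem.Dict.mk (pre ++ (k, v) :: rest)).insert k w = PySem.Dict.mk (pre ++ (k, w) :: rest) := by
  have hc : (PySem.Dict.mk (pre ++ (k, v) :: rest)).contains k = true := by
    simp [PySem.Dict.contains]
  simp only [List.map_append, List.map_cons] at hnd
  have hknotpre : ∀ a ∈ pre, (a.1 == k) = false := by
    intro a ha
    simp only [beq_eq_false_iff_ne, ne_eq]
    intro he
    exact (List.disjoint_of_nodup_append hnd) (by simpa [he] using List.mem_map_of_mem (f := Prod.fst) ha) (by simp)
  have hknotrest : ∀ a ∈ rest, (a.1 == k) = false := by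
    have h2 := (List.nodup_append.mp hnd).2.1
    intro a ha
    simp only [beq_eq_false_iff_ne, ne_eq]
    intro he
    exact (List.nodup_cons.mp h2).1 (by simpa [he] using List.mem_map_of_mem (f := Prod.fst) ha)
  have h1 : List.map (fun p => if (p.1 == k) = true then (k, w) else p) pre = pre :=
    (List.map_congr_left (fun a ha => by simp [hknotpre a ha])).trans (List.map_id _)
  have h2 : List.map (fun p => if (p.1 == k) = true then (k, w) else p) rest = rest :=
    (List.map_congr_left (fun a ha => by simp [hknotrest a ha])).trans (List.map_id _)
  simp only [PySem.Dict.insert, hc, if_true]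
  congr 1
  rw [List.map_append, List.map_cons, h1, h2]
  simp

-- inner loop: one line is appended to exactly the buckets whose interval matches
lemma pv_inner (p : Int × String) (ivs : List ((String × Int) × Int))
    (pre : List (String × List String)) (h : ((String × Int) × Int) → List String)
    (hnd : (pre.map Prod.fst ++ ivs.map (fun q => q.1.1)).Nodup) :
    ivs.foldl (fun d q => if pvCond p q then d.modify q.1.1 [] (fun l => l ++ [p.2]) else d)
      (PySem.Dict.mk (pre ++ ivs.map (fun q => (q.1.1, h q))))
    = PySem.Dict.mk (pre ++ ivs.map (fun q => (q.1.1, h q ++ if pvCond p q then [p.2] else []))) := by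
  induction ivs generalizing pre with
  | nil => simp
  | cons q ivs ih =>
    have hnd' : ((pre ++ [(q.1.1, h q)]).map Prod.fst ++ ivs.map (fun q => q.1.1)).Nodup := by
      simpa using hnd
    by_cases hc : pvCond p q = true
    · have hkpre : q.1.1 ∉ pre.map Prod.fst := by
        intro hmem
        exact (List.disjoint_of_nodup_append hnd) hmem (by simp)
      have hgd : (PySem.Dict.mk (pre ++ (q.1.1, h q) :: ivs.map (fun q => (q.1.1, h q)))).getD q.1.1 [] = h q :=
        pv_getD_of_split _ _ _ _ _ hkpre
      have hins := pv_insert_of_split pre q.1.1 (h q) (h q ++ [p.2]) (ivs.map (fun q => (q.1.1, h q)))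
        (by simpa [List.map_map, Function.comp] using hnd)
      simp only [List.foldl_cons, hc, if_true, List.map_cons, PySem.Dict.modify, hgd, hins]
      have := ih (pre := pre ++ [(q.1.1, h q ++ [p.2])])
        (by simpa using hnd)
      simpa [hc] using this
    · simp only [List.foldl_cons, hc, List.map_cons]
      have := ih (pre := pre ++ [(q.1.1, h q)]) hnd'
      simpa [hc] using this

-- outer loop: processing the lines one by one extends every bucket's filtered list
lemma pv_outer (rl L : List (Int × String)) (ivs : List ((String × Int) × Int))
    (hnd : (ivs.map (fun q => q.1.1)).Nodup) :
    rl.foldl (fun d p =>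
        ivs.foldl (fun d q => if pvCond p q then d.modify q.1.1 [] (fun l => l ++ [p.2]) else d) d)
      (PySem.Dict.mk (ivs.map (fun q => (q.1.1, pvFlt L q))))
    = PySem.Dict.mk (ivs.map (fun q => (q.1.1, pvFlt (L ++ rl) q))) := by
  induction rl generalizing L with
  | nil => simp
  | cons p rl ih =>
    simp only [List.foldl_cons]
    have hstep := pv_inner p ivs [] (fun q => pvFlt L q) (by simpa using hnd)
    simp only [List.nil_append] at hstep
    rw [hstep]
    have hext : ∀ q : (String × Int) × Int,
        pvFlt L q ++ (if pvCond p q then [p.2] else []) = pvFlt (L ++ [p]) q := by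
      intro q
      by_cases hc : pvCond p q = true <;> simp [pvFlt, hc]
    simp only [hext]
    rw [ih (L ++ [p])]
    simp

lemma pv_alt_eq_mid (rl : List (Int × String)) (hd : List (String × Int))
    (hnd : (hd.map Prod.fst).Nodup) :
    segment_resume_alt rl hd = pvMid rl hd := by
  unfold segment_resume_alt
  simp only []
  -- the init dict: fold of fresh inserts
  have hinit : (hd.foldl (fun d p => d.insert p.1 ([] : List String)) PySem.Dict.empty)
      = PySem.Dict.mk ((hd.zip (pvBounds rl hd)).map (fun q => (q.1.1, pvFlt [] q))) := by
    have h1 : hd.foldl (fun d p => d.insert p.1 ([] : List String)) PySem.Dict.empty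
        = (hd.map (fun p => (p.1, ([] : List String)))).foldl (fun d p => d.insert p.1 p.2) PySem.Dict.empty := by
      rw [List.foldl_map]
    have h2 := pv_foldl_insert_items (hd.map (fun p => (p.1, ([] : List String)))) PySem.Dict.empty
      (by simpa [PySem.Dict.empty, List.map_map, Function.comp] using hnd)
    apply PySem.Dict.ext
    rw [h1, h2]
    simp only [PySem.Dict.empty, List.nil_append]
    have : (hd.zip (pvBounds rl hd)).map (fun q => (q.1.1, pvFlt [] q))
        = (hd.zip (pvBounds rl hd)).map (fun q => (q.1.1, ([] : List String))) := by
      simp [pvFlt]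
    rw [this]
    have hkeys := pv_zip_keys rl hd
    calc hd.map (fun p => (p.1, ([] : List String)))
        = (hd.map Prod.fst).map (fun k => (k, ([] : List String))) := by simp [List.map_map]
      _ = ((hd.zip (pvBounds rl hd)).map (fun q => q.1.1)).map (fun k => (k, ([] : List String))) := by rw [hkeys]
      _ = (hd.zip (pvBounds rl hd)).map (fun q => (q.1.1, ([] : List String))) := by simp [List.map_map]
  rw [hinit]
  have hkeysnd : ((hd.zip (pvBounds rl hd)).map (fun q => q.1.1)).Nodup := by
    rw [pv_zip_keys]; exact hnd
  have := pv_outer rl [] (hd.zip (pvBounds rl hd)) hkeysnd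
  simp only [List.nil_append] at this
  show (rl.foldl (fun d p => (hd.zip (pvBounds rl hd)).foldl (fun d q =>
        if decide (q.1.2 < p.1) && decide (p.1 < q.2) then d.modify q.1.1 [] (fun l => l ++ [p.2]) else d) d)
      (PySem.Dict.mk ((hd.zip (pvBounds rl hd)).map (fun q => (q.1.1, pvFlt [] q))))).items
    = pvMid rl hd
  have hcond : ∀ (p : Int × String) (q : (String × Int) × Int),
      (decide (q.1.2 < p.1) && decide (p.1 < q.2)) = pvCond p q := by
    intro p q; rfl
  simp only [hcond]
  rw [this]
  simp [pvMid]

lemma pv_a_eq_mid (rl : List (Int × String)) (hd : List (String × Int))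
    (hnd : (hd.map Prod.fst).Nodup) :
    segment_resume rl hd = pvMid rl hd := by
  unfold segment_resume
  simp only []
  -- rewrite A's indexed fold as a fold over the bucket list
  have hlist : (List.range hd.length).map (fun i =>
        ((hd.getD i ("", 0)).1,
         (rl.filter (fun p => decide ((hd.getD i ("", 0)).2 < p.1) &&
            decide (p.1 < (if i < hd.length - 1 then (hd.getD (i + 1) ("", 0)).2 else (rl.length : Int))))).map (fun p => p.2)))
      = (hd.zip (pvBounds rl hd)).map (fun q => (q.1.1, pvFlt rl q)) := by
    apply List.ext_getElem
    · simp only [List.length_map, List.length_range, List.length_zip]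
      have := pvBounds_length rl hd
      omega
    · intro i hi1 hi2
      simp only [List.length_map, List.length_range] at hi1
      have hzlen : i < (hd.zip (pvBounds rl hd)).length := by
        simp only [List.length_map] at hi2; exact hi2
      have hz : (hd.zip (pvBounds rl hd))[i] = (hd[i], (pvBounds rl hd)[i]'(by
          have := pvBounds_length rl hd; simp; omega)) := by
        simp
      have hb : (pvBounds rl hd)[i]'(by have := pvBounds_length rl hd; simp; omega)
          = (if i < hd.length - 1 then (hd.getD (i + 1) ("", 0)).2 else (rl.length : Int)) := by
        by_cases hcase : i < hd.length - 1
        · have hlt : i < ((hd.drop 1).map (fun p => p.2)).length := by simp; omega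
          have hi1' : i + 1 < hd.length := by omega
          have hgd' : hd.getD (i + 1) ("", 0) = hd[i + 1] := by
            simp [List.getD, List.getElem?_eq_getElem hi1']
          simp only [pvBounds]
          rw [List.getElem_append_left hlt]
          simp only [List.getElem_map]
          rw [List.getElem_drop]
          have hswap : (1 : Nat) + i = i + 1 := by omega
          simp only [hswap, hcase, if_true, hgd']
        · have hge : ((hd.drop 1).map (fun p => p.2)).length ≤ i := by simp; omega
          simp only [pvBounds]
          rw [List.getElem_append_right hge]
          simp [hcase]
      simp only [List.getElem_map, List.getElem_range, hz, hb, pvFlt, pvCond]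
      have hgd : hd.getD i ("", 0) = hd[i] := by
        simp [List.getD, List.getElem?_eq_getElem hi1]
      rw [hgd]
  have h1 : (List.range hd.length).foldl (fun segmented_resume i =>
        segmented_resume.insert (hd.getD i ("", 0)).1
          ((rl.filter (fun p => decide ((hd.getD i ("", 0)).2 < p.1) &&
            decide (p.1 < (if i < hd.length - 1 then (hd.getD (i + 1) ("", 0)).2 else (rl.length : Int))))).map (fun p => p.2)))
        PySem.Dict.empty
      = ((List.range hd.length).map (fun i =>
        ((hd.getD i ("", 0)).1,
         (rl.filter (fun p => decide ((hd.getD i ("", 0)).2 < p.1) &&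
            decide (p.1 < (if i < hd.length - 1 then (hd.getD (i + 1) ("", 0)).2 else (rl.length : Int))))).map (fun p => p.2)))).foldl
          (fun d p => d.insert p.1 p.2) PySem.Dict.empty := by
    rw [List.foldl_map]
  rw [h1, hlist]
  have h2 := pv_foldl_insert_items ((hd.zip (pvBounds rl hd)).map (fun q => (q.1.1, pvFlt rl q))) PySem.Dict.empty
    (by
      simp only [PySem.Dict.empty, List.map_nil, List.nil_append, List.map_map]
      simpa [List.map_map, Function.comp] using (pv_zip_keys rl hd ▸ hnd : ((hd.zip (pvBounds rl hd)).map (fun q => q.1.1)).Nodup))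
  rw [h2]
  simp [pvMid, PySem.Dict.empty]

-- ===== VERDICT (by name: the statement is the Claim_ definition above) =====
theorem segment_resume_spec : Claim_equal_segment_resume := by
  intro rl hd _ hpre
  unfold Spec_segment_resume
  rw [pv_a_eq_mid rl hd hpre, pv_alt_eq_mid rl hd hpre]
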